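-- pv_equiv track=rewrite | github.com/emreuncu/CS-115 | CS115LAB/Lab06_mehmetemreuncu_Q1.py | form_equal_length
-- ===== SOURCE A (Python) =====
-- def form_equal_length(lst, integer):
--     sent = ""
--     for i in range(len(lst[0])):
--         for n in range(len(lst)):
--             if len(lst[n][i]) == integer:
--                 if sent == "":
--                     sent += lst[n][i].replace(lst[n][i][0], lst[n][i][0].upper())
--                 else:
--                     sent += " " + lst[n][i].lower()
--     return sent
-- ===== SOURCE B (Python) =====
-- def form_equal_length(lst, integer):
--     # Group every cell by its word length in one column-major pass (hash index),
--     # then the requested bucket IS the word list: no per-cell length test against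
--     # integer remains.  Rendering is a separate phase over that bucket.
--     by_len = {}
--     for col in zip(*lst):
--         for w in col:
--             by_len.setdefault(len(w), []).append(w)
--     words = by_len.get(integer, [])
--     if not words:
--         return ""
--     h = words[0]
--     return h.replace(h[0], h[0].upper()) + "".join(" " + w.lower() for w in words[1:])
-- ===== Notes on version B (the rewrite author's own statement) =====
-- stated objective: alternative
-- what changed: A grows the sentence in one pass with a branch on the accumulated string, testing each cell's length against integer in place; B instead builds a hash index (length -> words) over all cells in one column-major pass so the per-cell comparison against integer disappears into one bucket lookup, then formats that bucket in a separate phase (capitalized head plus joined lowercased tail).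
import Mathlib
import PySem

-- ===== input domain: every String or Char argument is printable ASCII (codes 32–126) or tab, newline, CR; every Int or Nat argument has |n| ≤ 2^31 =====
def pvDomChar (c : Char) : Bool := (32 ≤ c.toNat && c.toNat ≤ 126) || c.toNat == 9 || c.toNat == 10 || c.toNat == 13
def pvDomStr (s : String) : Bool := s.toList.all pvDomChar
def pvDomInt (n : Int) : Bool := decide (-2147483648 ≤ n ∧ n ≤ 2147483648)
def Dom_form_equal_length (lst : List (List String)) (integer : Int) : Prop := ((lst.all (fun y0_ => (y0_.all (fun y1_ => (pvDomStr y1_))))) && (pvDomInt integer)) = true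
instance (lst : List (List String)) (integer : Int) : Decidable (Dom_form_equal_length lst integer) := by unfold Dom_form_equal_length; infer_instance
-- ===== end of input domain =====

-- B groups all cells by word length into a hash index (one column-major pass), looks up the
-- requested bucket, and renders it in a separate join phase; A grows the sentence in one pass with a
-- branch on the accumulated string. Equivalence is proved on Pre_ (the inputs where A returns).

-- ===== PORT A =====
-- w.replace(w[0], w[0].upper()) — the expression both sources contain verbatim
def pvCap (w : String) : String :=
  let c := PySem.List.pyGetD w.toList 0 ' '
  PySem.Str.replace w (String.ofList [c]) (String.ofList [PySem.Chars.upperChar c])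

def form_equal_length (lst : List (List String)) (integer : Int) : String :=
  (PySem.List.pyRange 0 (PySem.List.len (PySem.List.pyGetD lst 0 [])) 1).foldl
    (fun sent i =>
      (PySem.List.pyRange 0 (PySem.List.len lst) 1).foldl
        (fun sent n =>
          let w := PySem.List.pyGetD (PySem.List.pyGetD lst n []) i ""
          if PySem.Str.len w == integer then
            if sent == "" then sent ++ pvCap w
            else sent ++ " " ++ PySem.Str.lower w
          else sent)
        sent)
    ""

-- ===== PORT B =====
-- hand port of zip(*lst) for a list of lists: the columns, truncated at the shortest row (exact)
def pvZipStar (lst : List (List String)) : List (List String) :=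
  match lst with
  | [] => []
  | r :: rs =>
    (List.range (rs.foldl (fun m row => min m row.length) r.length)).map
      (fun i => (r :: rs).map (fun row => row.getD i ""))

def form_equal_length_alt (lst : List (List String)) (integer : Int) : String :=
  let byLen := (pvZipStar lst).foldl
    (fun d col => col.foldl
      (fun d w => d.modify (PySem.Str.len w) [] (fun xs => xs ++ [w])) d)
    PySem.Dict.empty
  let words := byLen.getD integer []
  match words with
  | [] => ""
  | h :: rest => pvCap h ++ String.join (rest.map (fun w => " " ++ PySem.Str.lower w))

-- ===== PRECONDITION & SPEC =====
-- Pre_ excludes exactly the inputs where A raises: lst = [] and ragged lists (IndexError on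
-- lst[n][i]), and integer = 0 with an empty word among the scanned columns (IndexError on ''[0]).
def Pre_form_equal_length (lst : List (List String)) (integer : Int) : Prop :=
  lst ≠ [] ∧ (∀ row ∈ lst, lst.headI.length ≤ row.length) ∧
    (integer = 0 → ∀ row ∈ lst, ∀ w ∈ row.take lst.headI.length, w ≠ "")
instance (lst : List (List String)) (integer : Int) : Decidable (Pre_form_equal_length lst integer) := by unfold Pre_form_equal_length; infer_instance
def pvWitness_form_equal_length : List (List String) × Int := ([["ab", "x"], ["cd", "efg"]], 2)

def Spec_form_equal_length (lst : List (List String)) (integer : Int) (out : String) : Prop := out = form_equal_length_alt lst integer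
instance (lst : List (List String)) (integer : Int) (out : String) : Decidable (Spec_form_equal_length lst integer out) := by unfold Spec_form_equal_length; infer_instance

-- ===== CLAIM (what is proved, stated in full; the proofs are below) =====
def Claim_equal_form_equal_length : Prop := ∀ (lst : List (List String)) (integer : Int), Dom_form_equal_length lst integer → Pre_form_equal_length lst integer → Spec_form_equal_length lst integer (form_equal_length lst integer)

-- ===== LEMMAS AND PROOFS =====

-- the loop step of A, once the indices are resolved to the word itself
def pvStep : String → String → String :=
  fun sent w => if sent == "" then sent ++ pvCap w else sent ++ " " ++ PySem.Str.lower w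

-- the " w1 w2 …" tail that both programs append after the first word
def pvTail : List String → String
  | [] => ""
  | w :: t => " " ++ PySem.Str.lower w ++ pvTail t

theorem pv_go_single (o u : Char) : ∀ (fuel : Nat) (l acc : List Char), l.length ≤ fuel →
    PySem.Chars.replace.go [o] [u] fuel l acc
      = acc.reverse ++ l.map (fun c => if c == o then u else c) := by
  intro fuel
  induction fuel with
  | zero =>
    intro l acc h
    have hl : l = [] := by cases l <;> simp_all
    subst hl; simp [PySem.Chars.replace.go]
  | succ n ih =>
    intro l acc h
    cases l with
    | nil => simp [PySem.Chars.replace.go]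
    | cons c t =>
      by_cases hc : c = o
      · subst hc
        rw [show PySem.Chars.replace.go [c] [u] (n+1) (c :: t) acc
              = PySem.Chars.replace.go [c] [u] n t ([u].reverse ++ acc) from by
            simp [PySem.Chars.replace.go, List.isPrefixOf]]
        rw [ih t _ (by simpa using h)]
        simp
      · rw [show PySem.Chars.replace.go [o] [u] (n+1) (c :: t) acc
              = PySem.Chars.replace.go [o] [u] n t (c :: acc) from by
            simp [PySem.Chars.replace.go, List.isPrefixOf]
            intro h'; exact absurd h'.symm hc]
        rw [ih t _ (by simpa using h)]
        simp [hc]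

theorem pv_replace_single (o u : Char) (l : List Char) :
    PySem.Chars.replace l [o] [u] = l.map (fun c => if c == o then u else c) := by
  rw [show PySem.Chars.replace l [o] [u] = PySem.Chars.replace.go [o] [u] l.length l [] from by
    simp [PySem.Chars.replace]]
  simpa using pv_go_single o u l.length l [] le_rfl

theorem pvCap_ne_empty (w : String) (hw : w ≠ "") : pvCap w ≠ "" := by
  intro h
  cases hlist : w.toList with
  | nil => exact hw (by rw [← String.toList_inj]; simpa using hlist)
  | cons c t =>
    have h' := congrArg String.toList h
    simp only [pvCap, PySem.Str.toList_replace, String.toList_ofList, hlist,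
      PySem.List.pyGetD_zero_cons, pv_replace_single] at h'
    simp at h'

theorem pv_foldl_step_ne (t : List String) : ∀ s : String, s ≠ "" →
    t.foldl pvStep s = s ++ pvTail t := by
  induction t with
  | nil => intro s _; simp [pvTail]
  | cons w t ih =>
    intro s hs
    have hbeq : (s == "") = false := by simpa using hs
    have hne : s ++ " " ++ PySem.Str.lower w ≠ "" := by
      intro h
      have := congrArg String.toList h
      simp [String.toList_append] at this
    calc (w :: t).foldl pvStep s = t.foldl pvStep (s ++ " " ++ PySem.Str.lower w) := by
          simp [pvStep, hbeq]
      _ = s ++ " " ++ PySem.Str.lower w ++ pvTail t := ih _ hne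
      _ = s ++ pvTail (w :: t) := by
          simp [pvTail, String.append_assoc]

-- B's join of the rendered pieces is pvTail
theorem pv_join_tail_aux (t : List String) : ∀ a : String,
    (t.map (fun w => " " ++ PySem.Str.lower w)).foldl (fun r s => r ++ s) a = a ++ pvTail t := by
  induction t with
  | nil => intro a; simp [pvTail]
  | cons w t ih => intro a; simp [pvTail, ih, String.append_assoc]

theorem pv_join_tail (t : List String) :
    String.join (t.map (fun w => " " ++ PySem.Str.lower w)) = pvTail t := by
  simp [String.join, pv_join_tail_aux]

-- B's grouping loop: the bucket at k collects exactly the words of length k, in order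
theorem pv_getD_build : ∀ (ws : List String) (d : PySem.Dict Int (List String)) (k : Int),
    (ws.foldl (fun d w => d.modify (PySem.Str.len w) [] (fun xs => xs ++ [w])) d).getD k []
      = d.getD k [] ++ ws.filter (fun w => PySem.Str.len w == k) := by
  intro ws
  induction ws with
  | nil => intro d k; simp
  | cons w ws ih =>
    intro d k
    rw [List.foldl_cons, ih, PySem.Dict.getD_modify]
    by_cases hk : k = PySem.Str.len w
    · simp [hk]
    · simp [PySem.Str.len_eq] at hk
      have hk' : ¬ ((w.length : Int) = k) := fun h => hk h.symm
      simp [hk, hk']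

theorem pv_foldl_flatMap {α β σ : Type} (g : α → List β) (f : σ → β → σ) :
    ∀ (l : List α) (s : σ),
      l.foldl (fun s x => (g x).foldl f s) s = (l.flatMap g).foldl f s := by
  intro l
  induction l with
  | nil => intro s; simp
  | cons x l ih => intro s; simp [List.flatMap_cons, List.foldl_append, ih]

theorem pv_min_fold (L : Nat) (r : List String) (rs : List (List String))
    (h0 : r.length = L) (h : ∀ row ∈ r :: rs, L ≤ row.length) :
    rs.foldl (fun m row => min m row.length) r.length = L := by
  have hub : ∀ (a : Nat) (l : List (List String)), (∀ row ∈ l, L ≤ row.length) → L ≤ a →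
      L ≤ l.foldl (fun m row => min m row.length) a := by
    intro a l
    induction l generalizing a with
    | nil => intro _ ha; simpa using ha
    | cons x l ih =>
      intro hl ha
      exact ih _ (fun row hr => hl row (by simp [hr])) (le_min ha (hl x (by simp)))
  have hlb : ∀ (a : Nat) (l : List (List String)),
      l.foldl (fun m row => min m row.length) a ≤ a := by
    intro a l
    induction l generalizing a with
    | nil => simp
    | cons x l ih => exact le_trans (ih _) (min_le_left _ _)
  exact le_antisymm (h0 ▸ hlb _ _)
    (hub _ _ (fun row hr => h row (by simp [hr])) (by omega))

-- ===== VERDICT (by name: the statement is the Claim_ definition above) =====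
theorem form_equal_length_spec : Claim_equal_form_equal_length := by
  intro lst integer _hdom hpre
  obtain ⟨hne, hlen, hzero⟩ := hpre
  cases lst with
  | nil => exact absurd rfl hne
  | cons r rs =>
    simp only [List.headI] at hlen hzero
    show form_equal_length (r :: rs) integer = form_equal_length_alt (r :: rs) integer
    -- the word multiset both programs select, flattened column-major
    -- every selected word is nonempty (Pre_ rules out integer = 0 hitting an empty word)
    have hmem : ∀ w ∈ ((List.range r.length).flatMap
        (fun i => (r :: rs).map (fun row => row.getD i ""))).filter
          (fun w => PySem.Str.len w == integer), w ≠ "" := by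
      intro w hw hw0
      rw [List.mem_filter, List.mem_flatMap] at hw
      obtain ⟨⟨i, hi, hwmem⟩, hqual⟩ := hw
      rw [List.mem_range] at hi
      rw [List.mem_map] at hwmem
      obtain ⟨row, hrow, hweq⟩ := hwmem
      have hil : i < row.length := lt_of_lt_of_le hi (hlen row hrow)
      have hwrow : w = row[i] := by rw [← hweq, List.getD_eq_getElem row "" hil]
      have hint : integer = 0 := by
        simp only [beq_iff_eq, PySem.Str.len_eq] at hqual
        rw [hw0] at hqual
        simpa using hqual.symm
      have htake : w ∈ row.take r.length := by
        rw [hwrow]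
        have hlt : i < (row.take r.length).length := by simp; omega
        have hgt : (row.take r.length)[i] = row[i] := List.getElem_take
        rw [← hgt]
        exact List.getElem_mem hlt
      exact hzero hint row hrow w htake hw0
    -- ===== A reduces to a single fold of pvStep over the selected word list =====
    have hA : form_equal_length (r :: rs) integer
        = (((List.range r.length).flatMap
            (fun i => (r :: rs).map (fun row => row.getD i ""))).filter
              (fun w => PySem.Str.len w == integer)).foldl pvStep "" := by
      unfold form_equal_length
      rw [PySem.List.pyGetD_zero_cons]
      have h1 : (fun (sent : String) (i : Int) =>
          (PySem.List.pyRange 0 (PySem.List.len (r :: rs)) 1).foldl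
            (fun sent n =>
              let w := PySem.List.pyGetD (PySem.List.pyGetD (r :: rs) n []) i ""
              if PySem.Str.len w == integer then
                if sent == "" then sent ++ pvCap w
                else sent ++ " " ++ PySem.Str.lower w
              else sent) sent)
          = fun (sent : String) (i : Int) =>
            (r :: rs).foldl (fun sent row =>
              if PySem.Str.len (PySem.List.pyGetD row i "") == integer then
                pvStep sent (PySem.List.pyGetD row i "")
              else sent) sent := by
        funext sent i
        exact PySem.List.foldl_pyRange_zero_pyGetD (r :: rs) []
          (fun sent row =>
            if PySem.Str.len (PySem.List.pyGetD row i "") == integer then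
              pvStep sent (PySem.List.pyGetD row i "")
            else sent) sent
      rw [h1]
      have hlenr : PySem.List.len r = (r.length : Int) := by
        simp [PySem.List.len]
      rw [hlenr, PySem.List.pyRange_zero_nat, List.foldl_map]
      have h2 : (fun (sent : String) (k : Nat) =>
          (r :: rs).foldl (fun sent row =>
            if PySem.Str.len (PySem.List.pyGetD row (k : Int) "") == integer then
              pvStep sent (PySem.List.pyGetD row (k : Int) "")
            else sent) sent)
          = fun (sent : String) (k : Nat) =>
            (((r :: rs).map (fun row => row.getD k "")).filter
              (fun w => PySem.Str.len w == integer)).foldl pvStep sent := by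
        funext sent k
        simp only [PySem.List.pyGetD_natCast]
        rw [← PySem.List.foldl_if_eq_foldl_filter (fun w => PySem.Str.len w == integer) pvStep]
        rw [List.foldl_map]
      rw [h2]
      rw [pv_foldl_flatMap (fun k : Nat => ((r :: rs).map (fun row => row.getD k "")).filter
            (fun w => PySem.Str.len w == integer)) pvStep (List.range r.length) ""]
      rw [← List.filter_flatMap]
    rw [hA]
    -- ===== B's bucket at `integer` is that very word list =====
    have hzip : pvZipStar (r :: rs)
        = (List.range r.length).map (fun i => (r :: rs).map (fun row => row.getD i "")) := by
      simp only [pvZipStar]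
      rw [pv_min_fold r.length r rs rfl hlen]
    simp only [form_equal_length_alt, hzip]
    rw [pv_foldl_flatMap (fun col : List String => col)
          (fun (d : PySem.Dict Int (List String)) (w : String) =>
            d.modify (PySem.Str.len w) [] (fun xs => xs ++ [w]))]
    rw [List.flatMap_map, pv_getD_build]
    simp only [PySem.Dict.getD_empty, List.nil_append]
    generalize hg : ((List.range r.length).flatMap
        (fun i => (r :: rs).map (fun row => row.getD i ""))).filter
          (fun w => PySem.Str.len w == integer) = W at hmem ⊢
    cases W with
    | nil => rfl
    | cons h t =>
      have hh : h ≠ "" := hmem h (by simp)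
      have hcap : pvCap h ≠ "" := pvCap_ne_empty h hh
      show (h :: t).foldl pvStep "" = _
      simp only [pv_join_tail]
      calc (h :: t).foldl pvStep "" = t.foldl pvStep (pvCap h) := by simp [pvStep]
        _ = pvCap h ++ pvTail t := pv_foldl_step_ne t _ hcap
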